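-- pv_equiv track=rewrite | github.com/GreenBeanGravy/FA11y | lib/utilities/stw_world_info.py | _pretty_mission_type
-- ===== SOURCE A (Python) =====
-- def _pretty_mission_type(generator: str) -> str:
--     """Turn an Unreal missionGenerator path into a readable label."""
--     if not generator:
--         return "Unknown"
--     last = generator.rsplit(".", 1)[-1].rsplit("/", 1)[-1]
--     for prefix in ("MissionGen_", "MissionGeneratorData_"):
--         if last.startswith(prefix):
--             last = last[len(prefix):]
--     if last.endswith("_C"):
--         last = last[:-2]
--     # Strip leading difficulty/tier tokens like T1_, T2_, R5_.
--     parts = last.split("_")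
--     while parts and (parts[0].startswith("T") and parts[0][1:].isdigit()
--                      or parts[0].startswith("R") and parts[0][1:].isdigit()):
--         parts = parts[1:]
--     last = "_".join(parts)
--     out = []
--     for i, ch in enumerate(last):
--         if i > 0 and ch.isupper() and (
--             last[i - 1].islower()
--             or (i + 1 < len(last) and last[i + 1].islower())
--         ):
--             out.append(" ")
--         out.append(ch)
--     return "".join(out).replace("_", " ").strip()
-- ===== SOURCE B (Python) =====
-- def _pretty_mission_type(generator: str) -> str:
--     """Turn an Unreal missionGenerator path into a readable label."""
--     if not generator:
--         return "Unknown"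
--     # suffix after the last '.' or '/' separator (one rfind pass instead of two rsplits)
--     last = generator[max(generator.rfind("."), generator.rfind("/")) + 1:]
--     last = last.removeprefix("MissionGen_").removeprefix("MissionGeneratorData_")
--     last = last.removesuffix("_C")
--     # drop leading tier tokens directly on the string via partition (no split/join round-trip)
--     while True:
--         head, _, rest = last.partition("_")
--         if head[:1] in ("T", "R") and head[1:].isdigit():
--             last = rest
--         else:
--             break
--     # camel-case spacing: find maximal uppercase runs, collect the cut positions
--     # (run start when preceded by a lowercase letter; run end when followed by one),
--     # then emit every character prefixed by a space where a cut was recorded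
--     cuts = set()
--     n = len(last)
--     i = 0
--     while i < n:
--         if last[i].isupper():
--             s = i
--             while i < n and last[i].isupper():
--                 i += 1
--             if s > 0 and last[s - 1].islower():
--                 cuts.add(s)
--             if i < n and last[i].islower() and i - 1 > 0:
--                 cuts.add(i - 1)
--         else:
--             i += 1
--     out = "".join((" " if j in cuts else "") + ch for j, ch in enumerate(last))
--     return out.replace("_", " ").strip()
-- ===== Notes on version B (the rewrite author's own statement) =====
-- stated objective: alternative
-- what changed: Replaces A's two successive rsplit passes with one cut at the rightmost path separator (max of two rfinds), A's split/while/join tier stripping with a partition-based loop on the string itself, and A's per-character neighbour-test accumulator loop with a scan for maximal uppercase runs that records a set of cut positions (run start after a lowercase letter, run end before one) used to emit the spaced string.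
import Mathlib
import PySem

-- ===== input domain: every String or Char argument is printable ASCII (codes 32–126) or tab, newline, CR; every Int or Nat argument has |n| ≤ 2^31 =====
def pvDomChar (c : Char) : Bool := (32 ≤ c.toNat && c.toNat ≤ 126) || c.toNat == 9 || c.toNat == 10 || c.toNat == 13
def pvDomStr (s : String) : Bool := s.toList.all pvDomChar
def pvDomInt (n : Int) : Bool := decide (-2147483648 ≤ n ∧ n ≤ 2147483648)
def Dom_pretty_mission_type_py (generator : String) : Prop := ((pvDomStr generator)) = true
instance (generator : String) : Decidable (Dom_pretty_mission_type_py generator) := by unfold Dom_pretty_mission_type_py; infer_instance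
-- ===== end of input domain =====

-- B replaces A's two rsplit passes by one cut at the rightmost path separator (max of
-- two rfinds), A's split/drop/join tier loop by a partition-based loop on the string
-- itself, and A's per-character neighbour test by detecting maximal uppercase runs and
-- collecting a set of cut positions (run start after a lowercase letter, run end before
-- one) that drives the final emission (objective: alternative).

-- ===== PORT A =====

-- hand port (PySem has no rsplit): s.rsplit(sep, 1)[-1] for non-empty sep is the suffix
-- after the last occurrence of sep, the whole string if absent; exact on that domain
def pvRsplit1Last (cs sep : List Char) : List Char :=
  let r := PySem.Chars.rfind cs sep
  if r < 0 then cs else PySem.List.slice cs (some (r + sep.length)) none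

-- port of: if last.startswith(prefix): last = last[len(prefix):]
def pvPrefixA (l p : List Char) : List Char :=
  if PySem.Chars.startswith l p then PySem.List.slice l (some (p.length : Int)) none else l

-- port of: if last.endswith("_C"): last = last[:-2]
def pvSuffixCA (l : List Char) : List Char :=
  if PySem.Chars.endswith l ['_', 'C'] then PySem.List.slice l none (some (-2)) else l

-- port of A's tier-token test on parts[0]
def pvTierA (t : List Char) : Bool :=
  (PySem.Chars.startswith t ['T'] && PySem.Chars.strIsdigit (PySem.List.slice t (some 1) none))
  || (PySem.Chars.startswith t ['R'] && PySem.Chars.strIsdigit (PySem.List.slice t (some 1) none))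

-- port of: while parts and (...): parts = parts[1:]
def pvDropTiersA : List (List Char) → List (List Char)
  | [] => []
  | p :: rest => if pvTierA p then pvDropTiersA rest else p :: rest

def pvIslowerO (o : Option Char) : Bool :=
  match o with
  | some c => PySem.Chars.islower c
  | none => false

-- port of A's condition: i > 0 and ch.isupper() and (last[i-1].islower() or (i+1 < len(last) and last[i+1].islower()))
def pvCondA (l : List Char) (ich : Int × Char) : Bool :=
  decide (0 < ich.1) && PySem.Chars.isupper ich.2 &&
    (pvIslowerO (PySem.List.pyGet? l (ich.1 - 1)) ||
     (decide (ich.1 + 1 < (l.length : Int)) && pvIslowerO (PySem.List.pyGet? l (ich.1 + 1))))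

-- port of A's out-accumulator loop over enumerate(last)
def pvSpacedA (l : List Char) : List Char :=
  (PySem.List.enumerate l 0).foldl
    (fun acc ich => acc ++ (if pvCondA l ich then [' ', ich.2] else [ich.2])) []

def pretty_mission_type_py (generator : String) : String :=
  if generator = "" then "Unknown"
  else
    String.ofList (PySem.Chars.strip (PySem.Chars.replace
      (pvSpacedA (PySem.Chars.join ['_'] (pvDropTiersA (PySem.Chars.splitOn
        (pvSuffixCA (pvPrefixA (pvPrefixA (pvRsplit1Last (pvRsplit1Last generator.toList ['.']) ['/'])
          "MissionGen_".toList) "MissionGeneratorData_".toList))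
        ['_']))))
      ['_'] [' ']))

-- ===== PORT B =====

-- port of str.removeprefix / str.removesuffix (not in PySem; exact)
def pvRemovePrefix (l p : List Char) : List Char :=
  if PySem.Chars.startswith l p then l.drop p.length else l

def pvRemoveSuffix (l s : List Char) : List Char :=
  if PySem.Chars.endswith l s then l.take (l.length - s.length) else l

-- port of B's step: generator[max(generator.rfind("."), generator.rfind("/")) + 1:]
def pvLastSep (cs : List Char) : List Char :=
  PySem.List.slice cs
    (some (max (PySem.Chars.rfind cs ['.']) (PySem.Chars.rfind cs ['/']) + 1)) none

-- port of B's tier test: head[:1] in ("T", "R") and head[1:].isdigit()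
def pvTierB (t : List Char) : Bool :=
  (PySem.List.slice t none (some 1) == ['T'] || PySem.List.slice t none (some 1) == ['R'])
  && PySem.Chars.strIsdigit (t.drop 1)

-- hand port of last.partition("_") restricted to the two components B uses
-- (head before the first '_', rest after it; rest = "" when '_' is absent); exact
def pvPartition1 : List Char → List Char × List Char
  | [] => ([], [])
  | c :: cs => if c = '_' then ([], cs) else
      let p := pvPartition1 cs
      (c :: p.1, p.2)

-- port of B's loop: while True: head,_,rest = last.partition("_"); if tier(head): last = rest else break
-- (structural fuel: each step shortens the string, so length+1 steps always suffice;
--  with fuel 0 the string is returned unchanged, which the sufficiency lemma rules out)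
def pvTierLoopB : Nat → List Char → List Char
  | 0, l => l
  | f + 1, l =>
    if pvTierB (pvPartition1 l).1 then pvTierLoopB f (pvPartition1 l).2 else l

-- port of B's inner loop: while i < n and last[i].isupper(): i += 1
-- (the Python index last[i] is guarded by i < n, so getD is exact here;
--  fuel n - i is always enough: with fuel 0 we have i ≥ n and the guard is false anyway)
def pvRunEnd (l : List Char) (n : Nat) : Nat → Nat → Nat
  | 0, i => i
  | f + 1, i =>
    if i < n ∧ PySem.Chars.isupper (l.getD i ' ') then pvRunEnd l n f (i + 1) else i

-- port of B's outer loop collecting the cut-position set (same fuel discipline)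
def pvCutsGo (l : List Char) (n : Nat) : Nat → Nat → PySem.Set Int → PySem.Set Int
  | 0, _, cuts => cuts
  | f + 1, i, cuts =>
    if i < n then
      if PySem.Chars.isupper (l.getD i ' ') then
        let j := pvRunEnd l n (n - i) i
        let cuts1 := if 0 < i ∧ PySem.Chars.islower (l.getD (i - 1) ' ') then cuts.add (i : Int) else cuts
        let cuts2 := if j < n ∧ PySem.Chars.islower (l.getD j ' ') ∧ 1 < j then cuts1.add ((j : Int) - 1) else cuts1
        pvCutsGo l n f j cuts2
      else pvCutsGo l n f (i + 1) cuts
    else cuts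

def pvCuts (l : List Char) : PySem.Set Int :=
  pvCutsGo l l.length l.length 0 (PySem.Set.ofList [])

-- port of B's final comprehension: "".join((" " if j in cuts else "") + ch for j, ch in enumerate(last))
def pvOutB (l : List Char) : List Char :=
  (PySem.List.enumerate l 0).flatMap
    (fun jc => (if jc.1 ∈ pvCuts l then [' '] else []) ++ [jc.2])

def pretty_mission_type_py_alt (generator : String) : String :=
  if generator = "" then "Unknown"
  else
    String.ofList (PySem.Chars.strip (PySem.Chars.replace
      (pvOutB (pvTierLoopB
        ((pvRemoveSuffix (pvRemovePrefix (pvRemovePrefix (pvLastSep generator.toList)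
          "MissionGen_".toList) "MissionGeneratorData_".toList) ['_', 'C']).length + 1)
        (pvRemoveSuffix (pvRemovePrefix (pvRemovePrefix (pvLastSep generator.toList)
          "MissionGen_".toList) "MissionGeneratorData_".toList) ['_', 'C'])))
      ['_'] [' ']))

-- ===== PRECONDITION & SPEC =====
def Spec_pretty_mission_type_py (generator : String) (out : String) : Prop := out = pretty_mission_type_py_alt generator
instance (generator : String) (out : String) : Decidable (Spec_pretty_mission_type_py generator out) := by unfold Spec_pretty_mission_type_py; infer_instance

-- ===== CLAIM (what is proved, stated in full; the proofs are below) =====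
def Claim_equal_pretty_mission_type_py : Prop := ∀ (generator : String), Dom_pretty_mission_type_py generator → Spec_pretty_mission_type_py generator (pretty_mission_type_py generator)

-- ===== LEMMAS AND PROOFS =====

-- rfind characterization (structural view of PySem.Chars.rfind for single-char needles)
lemma pv_go_zero (s : List Char) (sub : List Char) :
    PySem.Chars.rfind.go s sub 0 = if sub.isPrefixOf s then 0 else -1 := by
  rw [PySem.Chars.rfind.go]

lemma pv_go_succ (s sub : List Char) (j : Nat) :
    PySem.Chars.rfind.go s sub (j+1) =
      if sub.isPrefixOf (s.drop (j+1)) then ((j:Int)+1) else PySem.Chars.rfind.go s sub j := by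
  rw [PySem.Chars.rfind.go]
  push_cast; ring_nf

lemma pv_go_cons (x : Char) (xs : List Char) (c : Char) (n : Nat) :
    PySem.Chars.rfind.go (x :: xs) [c] (n+1) =
      if 0 ≤ PySem.Chars.rfind.go xs [c] n then PySem.Chars.rfind.go xs [c] n + 1
      else if x = c then 0 else -1 := by
  induction n with
  | zero =>
    rw [pv_go_succ, pv_go_zero, pv_go_zero]
    rw [show (x :: xs).drop (0+1) = xs from rfl]
    by_cases h : [c].isPrefixOf xs
    · simp [h]
    · have hx : [c].isPrefixOf (x :: xs) = (x == c) := by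
        simp [List.isPrefixOf, eq_comm]
      simp only [h, hx, Nat.cast_zero]
      by_cases he : x = c <;> simp [he]
  | succ m ih =>
    rw [pv_go_succ, pv_go_succ xs [c] m]
    have hd : (x :: xs).drop (m + 1 + 1) = xs.drop (m + 1) := by simp
    rw [hd]
    by_cases h : [c].isPrefixOf (xs.drop (m+1))
    · simp only [h, if_true]
      rw [if_pos (by positivity)]
      push_cast; ring
    · simp only [h, Bool.false_eq_true, if_false]
      exact ih

lemma pv_rfind_nil (c : Char) : PySem.Chars.rfind [] [c] = -1 := by
  simp [PySem.Chars.rfind, pv_go_zero, List.isPrefixOf]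

lemma pv_rfind_cons (x : Char) (xs : List Char) (c : Char) :
    PySem.Chars.rfind (x :: xs) [c] =
      if 0 ≤ PySem.Chars.rfind xs [c] then PySem.Chars.rfind xs [c] + 1
      else if x = c then 0 else -1 := by
  simp only [PySem.Chars.rfind, List.length_cons]
  exact pv_go_cons x xs c xs.length

lemma pv_rfind_ge (cs : List Char) (c : Char) : -1 ≤ PySem.Chars.rfind cs [c] := by
  induction cs with
  | nil => rw [pv_rfind_nil]
  | cons x xs ih =>
    rw [pv_rfind_cons]
    split_ifs <;> omega

lemma pv_rfind_drop (cs : List Char) (c : Char) (k : Nat) :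
    PySem.Chars.rfind (cs.drop k) [c] =
      if (k : Int) ≤ PySem.Chars.rfind cs [c] then PySem.Chars.rfind cs [c] - k else -1 := by
  induction cs generalizing k with
  | nil => simp only [List.drop_nil, pv_rfind_nil]; rw [if_neg (by omega)]
  | cons x xs ih =>
    cases k with
    | zero =>
      simp only [List.drop_zero, Nat.cast_zero, sub_zero]
      have := pv_rfind_ge (x :: xs) c
      split_ifs with h
      · rfl
      · omega
    | succ m =>
      have hd : (x :: xs).drop (m+1) = xs.drop m := by simp
      rw [hd, ih, pv_rfind_cons]
      have := pv_rfind_ge xs c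
      split_ifs <;> push_cast <;> omega

lemma pvRsplit_drop (cs : List Char) (c : Char) :
    pvRsplit1Last cs [c] = cs.drop (PySem.Chars.rfind cs [c] + 1).toNat := by
  unfold pvRsplit1Last
  have h := pv_rfind_ge cs c
  by_cases hr : PySem.Chars.rfind cs [c] < 0
  · have h1 : PySem.Chars.rfind cs [c] = -1 := by omega
    simp [h1]
  · rw [if_neg hr, PySem.List.slice_from _ (by simp; omega)]
    norm_num

lemma pvRsplit_eq (cs : List Char) :
    pvRsplit1Last (pvRsplit1Last cs ['.']) ['/'] = pvLastSep cs := by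
  have g1 := pv_rfind_ge cs '.'
  have g2 := pv_rfind_ge cs '/'
  rw [pvRsplit_drop, pvRsplit_drop, List.drop_drop,
      pv_rfind_drop cs '/' (PySem.Chars.rfind cs ['.'] + 1).toNat]
  unfold pvLastSep
  rw [PySem.List.slice_from _ (by omega)]
  congr 1
  split_ifs with h <;> omega

lemma pvPrefix_eq (l p : List Char) : pvPrefixA l p = pvRemovePrefix l p := by
  unfold pvPrefixA pvRemovePrefix
  rw [PySem.List.slice_from l (by positivity)]
  simp

lemma pvSuffix_eq (l : List Char) : pvSuffixCA l = pvRemoveSuffix l ['_', 'C'] := by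
  unfold pvSuffixCA pvRemoveSuffix
  rw [PySem.List.slice_to_neg_ofNat l 2 (by norm_num)]
  rfl

lemma pvTier_eq (t : List Char) : pvTierA t = pvTierB t := by
  unfold pvTierA pvTierB
  cases t with
  | nil => decide
  | cons c cs =>
    rw [PySem.List.slice_from_one, PySem.List.slice_to _ (by norm_num)]
    by_cases hT : c = 'T'
    · subst hT; simp [PySem.Chars.startswith, List.isPrefixOf]
    · by_cases hR : c = 'R'
      · subst hR; simp [PySem.Chars.startswith, List.isPrefixOf]
      · have h1 : (c == 'T') = false := beq_eq_false_iff_ne.mpr hT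
        have h2 : (c == 'R') = false := beq_eq_false_iff_ne.mpr hR
        have h3 : ('T' == c) = false := beq_eq_false_iff_ne.mpr (fun h => hT h.symm)
        have h4 : ('R' == c) = false := beq_eq_false_iff_ne.mpr (fun h => hR h.symm)
        simp [PySem.Chars.startswith, List.isPrefixOf, h1, h2, h3, h4]

-- structural view of PySem.Chars.splitOn on the single-char separator '_'
def pvGlue (pre : List Char) : List (List Char) → List (List Char)
  | [] => [pre]
  | t :: ts => (pre ++ t) :: ts

def pvSp : List Char → List (List Char)
  | [] => [[]]
  | c :: rest => if c = '_' then [] :: pvSp rest else pvGlue [c] (pvSp rest)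

lemma pvSp_ne_nil (l : List Char) : pvSp l ≠ [] := by
  cases l with
  | nil => simp [pvSp]
  | cons c rest =>
    by_cases h : c = '_'
    · simp [pvSp, h]
    · simp only [pvSp, if_neg h]
      cases pvSp rest <;> simp [pvGlue]

lemma pvGlue_nil (L : List (List Char)) (h : L ≠ []) : pvGlue [] L = L := by
  cases L with
  | nil => exact absurd rfl h
  | cons t ts => simp [pvGlue]

lemma pvGlue_glue (a b : List Char) (L : List (List Char)) :
    pvGlue a (pvGlue b L) = pvGlue (a ++ b) L := by
  cases L <;> simp [pvGlue]

lemma pv_splitOn_go_K : ∀ (f : Nat) (l cur : List Char) (acc : List (List Char)),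
    l.length < f →
    PySem.Chars.splitOn.go ['_'] f l cur acc = acc.reverse ++ pvGlue cur.reverse (pvSp l) := by
  intro f
  induction f with
  | zero => intro l cur acc h; omega
  | succ f ih =>
    intro l cur acc h
    cases l with
    | nil =>
      rw [PySem.Chars.splitOn.go]
      · simp [pvSp, pvGlue]
      · omega
    | cons c rest =>
      rw [PySem.Chars.splitOn.go]
      by_cases hc : c = '_'
      · have hp : ['_'].isPrefixOf (c :: rest) = true := by simp [List.isPrefixOf, hc]
        rw [if_pos hp]
        subst hc
        rw [show List.drop (['_'].length) ('_' :: rest) = rest from rfl]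
        rw [ih rest [] _ (by simpa using Nat.lt_of_succ_lt_succ h)]
        simp only [pvSp, List.reverse_cons, List.reverse_nil]
        rw [pvGlue_nil _ (pvSp_ne_nil rest)]
        simp [pvGlue]
      · have hp : ['_'].isPrefixOf (c :: rest) = false := by
          simp [List.isPrefixOf]; exact fun he => hc he.symm
        rw [if_neg (by simp [hp])]
        rw [ih rest (c :: cur) acc (by simpa using Nat.lt_of_succ_lt_succ h)]
        simp only [pvSp, if_neg hc, List.reverse_cons]
        rw [pvGlue_glue]

lemma pv_splitOn_eq_sp (l : List Char) : PySem.Chars.splitOn l ['_'] = pvSp l := by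
  rw [PySem.Chars.splitOn, pv_splitOn_go_K (l.length + 1) l [] [] (by omega)]
  simp [pvGlue_nil _ (pvSp_ne_nil l)]

lemma pv_join_glue (c : Char) (L : List (List Char)) (h : L ≠ []) :
    PySem.Chars.join ['_'] (pvGlue [c] L) = c :: PySem.Chars.join ['_'] L := by
  cases L with
  | nil => exact absurd rfl h
  | cons t ts =>
    cases ts with
    | nil => simp [pvGlue, PySem.Chars.join_singleton]
    | cons u us => simp [pvGlue, PySem.Chars.join_cons_cons]

lemma pv_join_sp (l : List Char) : PySem.Chars.join ['_'] (pvSp l) = l := by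
  induction l with
  | nil => simp [pvSp, PySem.Chars.join_singleton]
  | cons c rest ih =>
    by_cases h : c = '_'
    · subst h
      rw [show pvSp ('_' :: rest) = [] :: pvSp rest from by simp [pvSp]]
      obtain ⟨t, ts, ht⟩ : ∃ t ts, pvSp rest = t :: ts := by
        cases hsp : pvSp rest with
        | nil => exact absurd hsp (pvSp_ne_nil rest)
        | cons t ts => exact ⟨t, ts, rfl⟩
      rw [ht, PySem.Chars.join_cons_cons]
      rw [ht] at ih
      simp [ih]
    · simp only [pvSp, if_neg h]
      rw [pv_join_glue c _ (pvSp_ne_nil rest), ih]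

lemma pv_part_no (l : List Char) (h : '_' ∉ l) : pvPartition1 l = (l, []) ∧ pvSp l = [l] := by
  induction l with
  | nil => simp [pvPartition1, pvSp]
  | cons c rest ih =>
    have hc : c ≠ '_' := fun he => h (he ▸ List.mem_cons_self ..)
    have hr := ih (fun hm => h (List.mem_cons_of_mem c hm))
    simp only [pvPartition1, pvSp, if_neg hc, hr.1, hr.2]
    simp [pvGlue]

lemma pv_part_yes (l : List Char) (h : '_' ∈ l) :
    pvSp l = (pvPartition1 l).1 :: pvSp (pvPartition1 l).2 := by
  induction l with
  | nil => simp at h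
  | cons c rest ih =>
    by_cases hc : c = '_'
    · simp [pvSp, pvPartition1, hc]
    · have hm : '_' ∈ rest := by
        rcases List.mem_cons.mp h with h1 | h1
        · exact absurd h1.symm hc
        · exact h1
      simp only [pvSp, pvPartition1, if_neg hc, ih hm]
      simp [pvGlue]

lemma pvPartition1_len (l : List Char) :
    (pvPartition1 l).2.length < l.length ∨ ((pvPartition1 l).1 = l ∧ (pvPartition1 l).2 = []) := by
  induction l with
  | nil => right; exact ⟨rfl, rfl⟩
  | cons c cs ih =>
    by_cases h : c = '_'
    · left; simp [pvPartition1, h]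
    · rcases ih with h2 | ⟨h2, h3⟩
      · left; simp only [pvPartition1, if_neg h]; simpa using Nat.lt_succ_of_lt h2
      · right; simp [pvPartition1, h, h2, h3]

lemma pvTierLoop_nil (f : Nat) : pvTierLoopB f [] = [] := by
  cases f with
  | zero => rfl
  | succ f => simp [pvTierLoopB, pvPartition1, pvTierB, PySem.List.slice]

lemma pvTierMain : ∀ (f : Nat) (l : List Char), l.length < f →
    PySem.Chars.join ['_'] (pvDropTiersA (PySem.Chars.splitOn l ['_'])) = pvTierLoopB f l := by
  intro f
  induction f with
  | zero => intro l h; omega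
  | succ f ih =>
    intro l hf
    rw [pvTierLoopB]
    by_cases h : pvTierB (pvPartition1 l).1 = true
    · rw [if_pos h]
      by_cases hm : '_' ∈ l
      · have hlt : (pvPartition1 l).2.length < l.length := by
          rcases pvPartition1_len l with h2 | ⟨h2, h3⟩
          · exact h2
          · have hne : l ≠ [] := fun he => by simp [he] at hm
            rw [h3]; exact List.length_pos_iff.mpr hne
        rw [← ih (pvPartition1 l).2 (by omega)]
        rw [pv_splitOn_eq_sp, pv_splitOn_eq_sp, pv_part_yes l hm]
        simp [pvDropTiersA, pvTier_eq, h]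
      · obtain ⟨hp, hs⟩ := pv_part_no l hm
        have hA : pvTierA l = true := by rw [pvTier_eq]; rw [hp] at h; exact h
        rw [pv_splitOn_eq_sp, hs, hp]
        simp only [pvDropTiersA, hA, if_pos]
        rw [pvTierLoop_nil]
        simp [PySem.Chars.join_nil]
    · rw [if_neg h]
      by_cases hm : '_' ∈ l
      · rw [pv_splitOn_eq_sp, pv_part_yes l hm]
        have hA : pvTierA (pvPartition1 l).1 = false := by rw [pvTier_eq]; simpa using h
        rw [show pvDropTiersA ((pvPartition1 l).1 :: pvSp (pvPartition1 l).2)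
              = (pvPartition1 l).1 :: pvSp (pvPartition1 l).2 from by simp [pvDropTiersA, hA]]
        rw [← pv_part_yes l hm, pv_join_sp]
      · obtain ⟨hp, hs⟩ := pv_part_no l hm
        rw [pv_splitOn_eq_sp, hs]
        have hA : pvTierA l = false := by rw [pvTier_eq]; rw [hp] at h; simpa using h
        simp [pvDropTiersA, hA]
lemma pv_upper_not_lower (c : Char) (h : PySem.Chars.isupper c = true) :
    PySem.Chars.islower c = false := by
  simp [PySem.Chars.isupper, PySem.Chars.islower, Char.le_def,
    UInt32.le_iff_toNat_le] at *
  intro hc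
  have h2 := h.2
  omega

-- the cut positions B records, as a predicate on the input
def pvIsCut (l : List Char) (p : Nat) : Prop :=
  0 < p ∧ p < l.length ∧ PySem.Chars.isupper (l.getD p ' ') = true ∧
    (PySem.Chars.islower (l.getD (p-1) ' ') = true ∨
     (p + 1 < l.length ∧ PySem.Chars.islower (l.getD (p+1) ' ') = true))

lemma pvRunEnd_spec (l : List Char) (n : Nat) :
    ∀ (f i : Nat), i ≤ n → n ≤ f + i →
    i ≤ pvRunEnd l n f i ∧ pvRunEnd l n f i ≤ n ∧
    (∀ p, i ≤ p → p < pvRunEnd l n f i → PySem.Chars.isupper (l.getD p ' ') = true) ∧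
    ¬ (pvRunEnd l n f i < n ∧ PySem.Chars.isupper (l.getD (pvRunEnd l n f i) ' ') = true) := by
  intro f
  induction f with
  | zero =>
    intro i h1 h2
    refine ⟨le_refl i, by simp [pvRunEnd]; omega, by intro p hp1 hp2; simp [pvRunEnd] at hp2; omega, ?_⟩
    simp only [pvRunEnd]
    omega
  | succ f ih =>
    intro i h1 h2
    rw [pvRunEnd]
    by_cases h : i < n ∧ PySem.Chars.isupper (l.getD i ' ') = true
    · rw [if_pos h]
      obtain ⟨a, b, c, d⟩ := ih (i+1) (by omega) (by omega)
      refine ⟨by omega, b, ?_, d⟩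
      intro p hp1 hp2
      rcases Nat.eq_or_lt_of_le hp1 with he | hl
      · exact he ▸ h.2
      · exact c p hl hp2
    · rw [if_neg h]
      exact ⟨le_refl i, by omega, by intro p h1 h2; omega, h⟩

lemma pv_getD_default (l : List Char) (j : Nat) (h : l.length ≤ j) : l.getD j ' ' = ' ' := by
  simp [List.getD, List.getElem?_eq_none h]

lemma pvCutsGo_unfold_upper (l : List Char) (n f i : Nat) (cuts : PySem.Set Int)
    (hn : i < n) (hu : PySem.Chars.isupper (l.getD i ' ') = true) :
    pvCutsGo l n (f+1) i cuts = pvCutsGo l n f (pvRunEnd l n (n-i) i)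
      (if pvRunEnd l n (n-i) i < n ∧ PySem.Chars.islower (l.getD (pvRunEnd l n (n-i) i) ' ') = true ∧ 1 < pvRunEnd l n (n-i) i
        then (if 0 < i ∧ PySem.Chars.islower (l.getD (i-1) ' ') = true then cuts.add (i:Int) else cuts).add ((pvRunEnd l n (n-i) i : Int) - 1)
        else (if 0 < i ∧ PySem.Chars.islower (l.getD (i-1) ' ') = true then cuts.add (i:Int) else cuts)) := by
  rw [pvCutsGo]
  simp only [if_pos hn, hu, if_pos]

lemma pvCutsGo_unfold_other (l : List Char) (n f i : Nat) (cuts : PySem.Set Int)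
    (hn : i < n) (hu : ¬ PySem.Chars.isupper (l.getD i ' ') = true) :
    pvCutsGo l n (f+1) i cuts = pvCutsGo l n f (i+1) cuts := by
  rw [pvCutsGo]
  simp only [if_pos hn]
  rw [if_neg (by simpa using hu)]

lemma pvCutsGo_unfold_done (l : List Char) (n f i : Nat) (cuts : PySem.Set Int)
    (hn : ¬ i < n) : pvCutsGo l n (f+1) i cuts = cuts := by
  rw [pvCutsGo]
  simp only [if_neg hn]

lemma pv_mem_add2 (cuts : PySem.Set Int) (c1 c2 : Prop) [Decidable c1] [Decidable c2]
    (a b y : Int) :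
    (y ∈ (if c2 then (if c1 then cuts.add a else cuts).add b
            else (if c1 then cuts.add a else cuts))) ↔
      (y ∈ cuts ∨ (c1 ∧ y = a) ∨ (c2 ∧ y = b)) := by
  split_ifs <;> first | (simp only [PySem.Set.mem_add]; tauto) | tauto


lemma pvCutsGo_mem (l : List Char) :
    ∀ (k i : Nat) (cuts : PySem.Set Int), l.length - i ≤ k →
      (i = 0 ∨ PySem.Chars.isupper (l.getD (i-1) ' ') = false ∨
        PySem.Chars.isupper (l.getD i ' ') = false) →
      ∀ x : Int, (x ∈ pvCutsGo l l.length k i cuts ↔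
        x ∈ cuts ∨ ∃ p : Nat, i ≤ p ∧ pvIsCut l p ∧ x = (p:Int)) := by
  intro k
  induction k with
  | zero =>
    intro i cuts hk hP x
    rw [show pvCutsGo l l.length 0 i cuts = cuts from rfl]
    constructor
    · exact Or.inl
    · rintro (h | ⟨p, hp1, hp2, hp3⟩)
      · exact h
      · exact absurd hp2.2.1 (by omega)
  | succ k ih =>
    intro i cuts hk hP x
    by_cases hn : i < l.length
    · by_cases hu : PySem.Chars.isupper (l.getD i ' ') = true
      · obtain ⟨hij, hjn, hrun, hstop⟩ :=
          pvRunEnd_spec l l.length (l.length - i) i (le_of_lt hn) (by omega)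
        rw [pvCutsGo_unfold_upper l _ k i cuts hn hu]
        obtain ⟨j, hj⟩ : ∃ j, pvRunEnd l l.length (l.length - i) i = j := ⟨_, rfl⟩
        rw [hj] at hij hjn hrun hstop ⊢
        have hilt : i < j := by
          rcases Nat.eq_or_lt_of_le hij with he | h
          · exact absurd ⟨he ▸ hn, he ▸ hu⟩ hstop
          · exact h
        have hju : PySem.Chars.isupper (l.getD j ' ') = false := by
          by_cases hc : j < l.length
          · by_contra hne
            exact hstop ⟨hc, by simpa using hne⟩
          · rw [pv_getD_default l j (by omega)]; decide
        rw [ih j _ (by omega) (Or.inr (Or.inr hju)) x]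
        have hmem2 : ∀ y : Int, _ := fun y : Int => pv_mem_add2 cuts
          (0 < i ∧ PySem.Chars.islower (l.getD (i-1) ' ') = true)
          (j < l.length ∧ PySem.Chars.islower (l.getD j ' ') = true ∧ 1 < j)
          (i:Int) ((j:Int) - 1) y
        constructor
        · rintro (h2 | ⟨p, hpj, hcut, hx⟩)
          · rcases (hmem2 x).mp h2 with h | ⟨⟨h0, hl0⟩, hx⟩ | ⟨⟨h1, h2', h3⟩, hx⟩
            · exact Or.inl h
            · exact Or.inr ⟨i, le_refl i, ⟨h0, hn, hu, Or.inl hl0⟩, hx⟩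
            · refine Or.inr ⟨j - 1, by omega, ⟨by omega, by omega,
                hrun (j-1) (by omega) (by omega), Or.inr ⟨by omega, ?_⟩⟩, by omega⟩
              have he : j - 1 + 1 = j := by omega
              rw [he]
              exact h2'
          · exact Or.inr ⟨p, by omega, hcut, hx⟩
        · rintro (h | ⟨p, hpi, hcut, hx⟩)
          · exact Or.inl ((hmem2 x).mpr (Or.inl h))
          · by_cases hpj : j ≤ p
            · exact Or.inr ⟨p, hpj, hcut, hx⟩
            · push Not at hpj
              obtain ⟨hp0, hplen, hpu, hor⟩ := hcut
              rcases hor with hlow | ⟨hnext, hlow⟩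
              · have hpi' : p = i := by
                  by_contra hne
                  have hup : PySem.Chars.isupper (l.getD (p-1) ' ') = true :=
                    hrun (p-1) (by omega) (by omega)
                  rw [pv_upper_not_lower _ hup] at hlow
                  exact absurd hlow (by simp)
                subst hpi'
                exact Or.inl ((hmem2 x).mpr (Or.inr (Or.inl ⟨⟨hp0, hlow⟩, hx⟩)))
              · have hpj1 : p = j - 1 := by
                  by_contra hne
                  have hup : PySem.Chars.isupper (l.getD (p+1) ' ') = true :=
                    hrun (p+1) (by omega) (by omega)
                  rw [pv_upper_not_lower _ hup] at hlow
                  exact absurd hlow (by simp)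
                have hjp : j = p + 1 := by omega
                refine Or.inl ((hmem2 x).mpr (Or.inr (Or.inr
                  ⟨⟨by omega, ?_, by omega⟩, by omega⟩)))
                rw [hjp]
                exact hlow
      · rw [pvCutsGo_unfold_other l _ k i cuts hn hu,
            ih (i+1) cuts (by omega) (Or.inr (Or.inl (by simpa using hu))) x]
        constructor
        · rintro (h | ⟨p, hp1, hp2, hp3⟩)
          · exact Or.inl h
          · exact Or.inr ⟨p, by omega, hp2, hp3⟩
        · rintro (h | ⟨p, hp1, hp2, hp3⟩)
          · exact Or.inl h
          · refine Or.inr ⟨p, ?_, hp2, hp3⟩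
            rcases Nat.eq_or_lt_of_le hp1 with he | hlt
            · subst he; exact absurd hp2.2.2.1 (by simpa using hu)
            · omega
    · rw [pvCutsGo_unfold_done l _ k i cuts hn]
      constructor
      · exact Or.inl
      · rintro (h | ⟨p, hp1, hp2, hp3⟩)
        · exact h
        · exact absurd hp2.2.1 (by omega)

lemma pv_islowerO_getD (l : List Char) (k : Nat) :
    pvIslowerO l[k]? = PySem.Chars.islower (l.getD k ' ') := by
  unfold pvIslowerO
  cases hk : l[k]? with
  | none => simp [List.getD_eq_getElem?_getD, hk]; decide
  | some c => simp [List.getD_eq_getElem?_getD, hk]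

lemma pvCondA_iff (l : List Char) (i : Nat) (h : i < l.length) :
    (pvCondA l ((i:Int), l[i]) = true) ↔ pvIsCut l i := by
  unfold pvCondA pvIsCut
  by_cases h0 : i = 0
  · subst h0; simp
  · have h0' : 0 < i := Nat.pos_of_ne_zero h0
    have e1 : (i:Int) - 1 = ((i-1 : Nat) : Int) := by omega
    have e2 : (i:Int) + 1 = ((i+1 : Nat) : Int) := by omega
    rw [show ((i:Int), l[i]).1 = (i:Int) from rfl]
    simp only [e1, e2, PySem.List.pyGet?_natCast, pv_islowerO_getD]
    rw [List.getD_eq_getElem l ' ' h]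
    simp only [Bool.and_eq_true, Bool.or_eq_true, decide_eq_true_eq]
    constructor
    · rintro ⟨⟨_, hup⟩, hor⟩
      refine ⟨h0', h, hup, ?_⟩
      rcases hor with h1 | ⟨h2, h3⟩
      · exact Or.inl h1
      · exact Or.inr ⟨by omega, h3⟩
    · rintro ⟨_, _, hup, hor⟩
      refine ⟨⟨by omega, hup⟩, ?_⟩
      rcases hor with h1 | ⟨h2, h3⟩
      · exact Or.inl h1
      · exact Or.inr ⟨by omega, h3⟩

lemma pvCuts_mem (l : List Char) (x : Int) :
    x ∈ pvCuts l ↔ ∃ p : Nat, pvIsCut l p ∧ x = (p:Int) := by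
  unfold pvCuts
  rw [pvCutsGo_mem l l.length 0 _ (by omega) (Or.inl rfl) x]
  constructor
  · rintro (h | ⟨p, _, hc, hx⟩)
    · exact absurd h (by simp)
    · exact ⟨p, hc, hx⟩
  · rintro ⟨p, hc, hx⟩
    exact Or.inr ⟨p, Nat.zero_le p, hc, hx⟩

lemma pvCamel_eq (l : List Char) : pvSpacedA l = pvOutB l := by
  have key : ∀ (i : Nat) (h : i < l.length),
      ((pvCondA l ((i:Int), l[i]'h) = true) ↔ ((i:Int)) ∈ pvCuts l) := by
    intro i h
    rw [pvCondA_iff l i h, pvCuts_mem]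
    constructor
    · intro hc; exact ⟨i, hc, rfl⟩
    · rintro ⟨p, hc, hx⟩
      have : p = i := by omega
      exact this ▸ hc
  unfold pvSpacedA pvOutB
  rw [PySem.List.foldl_append_eq_flatMap, List.nil_append,
      List.flatMap_def, List.flatMap_def]
  congr 1
  apply List.map_congr_left
  intro jc hjc
  obtain ⟨n, hn, hg⟩ := List.getElem_of_mem hjc
  have hlen : n < l.length := by simpa [PySem.List.length_enumerate] using hn
  rw [PySem.List.getElem_enumerate] at hg
  have hjc1 : jc = ((n:Int), l[n]) := by
    rw [← hg]; simp
  subst hjc1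
  by_cases hc : ((n:Int)) ∈ pvCuts l
  · rw [if_pos ((key n hlen).mpr hc), if_pos hc]
    rfl
  · rw [if_neg (fun hx => hc ((key n hlen).mp hx)), if_neg hc]
    rfl

-- ===== VERDICT (by name: the statement is the Claim_ definition above) =====
theorem pretty_mission_type_py_spec : Claim_equal_pretty_mission_type_py := by
  intro generator _
  unfold Spec_pretty_mission_type_py pretty_mission_type_py pretty_mission_type_py_alt
  by_cases hg : generator = ""
  · simp [hg]
  · simp only [if_neg hg]
    rw [pvRsplit_eq, pvPrefix_eq, pvPrefix_eq, pvSuffix_eq,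
        pvTierMain _ _ (Nat.lt_succ_self _), pvCamel_eq]
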